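-- pv_equiv track=rewrite | github.com/Pavelwell7/palworld6 | python_scripts6/main6.py | calculate_password_score
-- ===== SOURCE A (Python) =====
-- def has_digit(password):
--     return any(letter.isdigit() for letter in password)
--
-- def is_very_long(password):
--     password_length = len(password)
--     return password_length > 12
--
-- def has_upper_letters(password):
--     return any(letter.isupper() for letter in password)
--
-- def has_lower_letters(password):
--     return any(letter.islower() for letter in password)
--
-- def has_symbols(password):
--     return any(not letter.isalnum() for letter in password)
--
-- def calculate_password_score(password):
--     score = 0
--     secondary_functions = [
--         has_digit,
--         is_very_long,
--         has_upper_letters,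
--         has_lower_letters,
--         has_symbols,
--     ]
--     for second in secondary_functions:
--         if second(password):
--             score += 2
--     return score
-- ===== SOURCE B (Python) =====
-- def calculate_password_score(password):
--     has_digit = has_upper = has_lower = has_symbol = False
--     for ch in password:
--         if ch.isdigit():
--             has_digit = True
--         if ch.isupper():
--             has_upper = True
--         if ch.islower():
--             has_lower = True
--         if not ch.isalnum():
--             has_symbol = True
--     flags = (has_digit, len(password) > 12, has_upper, has_lower, has_symbol)
--     return 2 * sum(flags)
-- ===== Notes on version B (the rewrite author's own statement) =====
-- stated objective: alternative
-- what changed: Replaces the five helper predicates (each its own any-pass over the string) and the loop over a list of functions with one single pass over the characters maintaining four booleans, plus a separate length check; score = 2 * number of true flags.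
import Mathlib
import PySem

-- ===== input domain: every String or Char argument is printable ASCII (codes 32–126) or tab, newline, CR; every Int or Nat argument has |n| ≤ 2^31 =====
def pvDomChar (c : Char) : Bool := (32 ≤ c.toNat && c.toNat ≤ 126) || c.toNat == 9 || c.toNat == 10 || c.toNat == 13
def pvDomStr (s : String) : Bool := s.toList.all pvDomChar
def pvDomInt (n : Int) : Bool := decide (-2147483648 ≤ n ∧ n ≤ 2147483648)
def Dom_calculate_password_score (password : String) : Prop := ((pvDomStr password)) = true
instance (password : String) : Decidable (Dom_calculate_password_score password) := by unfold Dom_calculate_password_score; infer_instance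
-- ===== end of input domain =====

-- B replaces A's five separate any-passes (one per helper predicate) and the loop over a
-- list of helper functions with a single pass over the characters maintaining four booleans;
-- objective: alternative (same cost, one pass instead of five).


-- ===== PORT A =====
def has_digit (password : String) : Bool :=
  password.toList.any (fun letter => PySem.Chars.isdigit letter)

def is_very_long (password : String) : Bool :=
  let password_length := PySem.Str.len password
  decide (password_length > 12)

def has_upper_letters (password : String) : Bool :=
  password.toList.any (fun letter => PySem.Chars.isupper letter)

def has_lower_letters (password : String) : Bool :=
  password.toList.any (fun letter => PySem.Chars.islower letter)

def has_symbols (password : String) : Bool :=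
  password.toList.any (fun letter => !PySem.Chars.isalnum letter)

def calculate_password_score (password : String) : Int :=
  let secondary_functions : List (String → Bool) :=
    [has_digit, is_very_long, has_upper_letters, has_lower_letters, has_symbols]
  secondary_functions.foldl
    (fun score second => if second password then score + 2 else score) 0

-- ===== PORT B =====
def calculate_password_score_alt (password : String) : Int :=
  let st := password.toList.foldl
    (fun (st : Bool × Bool × Bool × Bool) ch =>
      ( st.1 || PySem.Chars.isdigit ch
      , st.2.1 || PySem.Chars.isupper ch
      , st.2.2.1 || PySem.Chars.islower ch
      , st.2.2.2 || !PySem.Chars.isalnum ch ))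
    (false, false, false, false)
  2 * ((if st.1 then (1 : Int) else 0)
     + (if PySem.Str.len password > 12 then (1 : Int) else 0)
     + (if st.2.1 then (1 : Int) else 0)
     + (if st.2.2.1 then (1 : Int) else 0)
     + (if st.2.2.2 then (1 : Int) else 0))

-- ===== PRECONDITION & SPEC =====
def Spec_calculate_password_score (password : String) (out : Int) : Prop := out = calculate_password_score_alt password
instance (password : String) (out : Int) : Decidable (Spec_calculate_password_score password out) := by unfold Spec_calculate_password_score; infer_instance

-- ===== CLAIM (what is proved, stated in full; the proofs are below) =====
def Claim_equal_calculate_password_score : Prop := ∀ (password : String), Dom_calculate_password_score password → Spec_calculate_password_score password (calculate_password_score password)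

-- ===== LEMMAS AND PROOFS =====
theorem pv_fold_flags (cs : List Char) (d u l s : Bool) :
    cs.foldl
      (fun (st : Bool × Bool × Bool × Bool) ch =>
        ( st.1 || PySem.Chars.isdigit ch
        , st.2.1 || PySem.Chars.isupper ch
        , st.2.2.1 || PySem.Chars.islower ch
        , st.2.2.2 || !PySem.Chars.isalnum ch ))
      (d, u, l, s)
    = ( d || cs.any (fun c => PySem.Chars.isdigit c)
      , u || cs.any (fun c => PySem.Chars.isupper c)
      , l || cs.any (fun c => PySem.Chars.islower c)
      , s || cs.any (fun c => !PySem.Chars.isalnum c) ) := by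
  induction cs generalizing d u l s with
  | nil => simp
  | cons c cs ih =>
    simp [List.foldl_cons, ih, Bool.or_assoc]

-- ===== VERDICT (by name: the statement is the Claim_ definition above) =====
theorem calculate_password_score_spec : Claim_equal_calculate_password_score := by
  intro password _
  show calculate_password_score password = calculate_password_score_alt password
  unfold calculate_password_score calculate_password_score_alt
  simp only [List.foldl_cons, List.foldl_nil, pv_fold_flags, Bool.false_or]
  unfold has_digit is_very_long has_upper_letters has_lower_letters has_symbols
  cases hd : password.toList.any (fun letter => PySem.Chars.isdigit letter) <;>
  cases hu : password.toList.any (fun letter => PySem.Chars.isupper letter) <;>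
  cases hl : password.toList.any (fun letter => PySem.Chars.islower letter) <;>
  cases hs : password.toList.any (fun letter => !PySem.Chars.isalnum letter) <;>
  simp [hd, hu, hl, hs] <;> split_ifs <;> omega
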